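-- pv_equiv track=rewrite | github.com/chimaomao/frequent_pattern | frequent_pattern.py | sortFreqItem
-- ===== SOURCE A (Python) =====
-- def sortFreqItem(freqTable, headerWord):
--     sortFreqTable = []
--     for tid in freqTable:
--         tranItem = []
--         for word in headerWord:
--             if word in tid:
--                 tranItem.append(word)
--         sortFreqTable.append(tranItem)
--
--     return sortFreqTable
-- ===== SOURCE B (Python) =====
-- def sortFreqItem(freqTable, headerWord):
--     # Inverted index: header word -> its positions; each transaction gathers and sorts
--     # the positions of its own distinct words instead of scanning the whole header.
--     pos = {}
--     for i, w in enumerate(headerWord):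
--         pos.setdefault(w, []).append(i)
--     sortFreqTable = []
--     for tid in freqTable:
--         idx = sorted(i for w in set(tid) if w in pos for i in pos[w])
--         sortFreqTable.append([headerWord[i] for i in idx])
--     return sortFreqTable
-- ===== Notes on version B (the rewrite author's own statement) =====
-- stated objective: faster
-- what changed: B builds an inverted index from header word to its positions once and, per transaction, gathers and sorts the positions of the transaction's own distinct words, instead of scanning the whole header list for every transaction.
import Mathlib
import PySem

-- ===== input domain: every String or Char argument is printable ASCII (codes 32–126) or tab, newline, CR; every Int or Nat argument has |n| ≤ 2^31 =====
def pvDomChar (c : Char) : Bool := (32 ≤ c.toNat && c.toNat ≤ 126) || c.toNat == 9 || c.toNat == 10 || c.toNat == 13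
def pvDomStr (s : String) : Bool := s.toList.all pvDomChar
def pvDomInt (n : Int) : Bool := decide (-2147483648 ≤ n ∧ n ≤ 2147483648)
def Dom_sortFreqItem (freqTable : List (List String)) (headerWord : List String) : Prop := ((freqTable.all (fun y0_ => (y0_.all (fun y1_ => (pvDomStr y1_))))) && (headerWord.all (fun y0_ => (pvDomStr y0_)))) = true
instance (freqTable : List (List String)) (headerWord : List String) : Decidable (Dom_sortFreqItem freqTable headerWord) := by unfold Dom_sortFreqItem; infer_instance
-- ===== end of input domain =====

-- B builds an inverted index (header word -> its positions) once and each transaction gathers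
-- and sorts the positions of its own distinct words, instead of scanning the whole header list
-- per transaction (objective: faster when the header is large).

-- ===== PORT A =====
def sortFreqItem (freqTable : List (List String)) (headerWord : List String) : List (List String) :=
  freqTable.foldl
    (fun sortFreqTable tid =>
      sortFreqTable ++
        [headerWord.foldl (fun tranItem word => if word ∈ tid then tranItem ++ [word] else tranItem) []])
    []

-- ===== PORT B =====
-- pos = {}; for i, w in enumerate(headerWord): pos.setdefault(w, []).append(i)
def posB (headerWord : List String) : PySem.Dict String (List Int) :=
  (PySem.List.enumerate headerWord 0).foldl (fun d p => d.modify p.2 [] (· ++ [p.1])) PySem.Dict.empty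

def sortFreqItem_alt (freqTable : List (List String)) (headerWord : List String) : List (List String) :=
  let pos := posB headerWord
  freqTable.foldl
    (fun sortFreqTable tid =>
      -- idx = sorted(i for w in set(tid) if w in pos for i in pos[w])
      let idx := PySem.List.sorted
        (((PySem.Set.ofList tid).filter (fun w => pos.contains w)).flatMap (fun w => pos.getD w []))
        (fun i => i) false
      -- [headerWord[i] for i in idx]; every i in idx is a valid index, so hw[i] never raises
      sortFreqTable ++ [idx.map (fun i => PySem.List.pyGetD headerWord i "")])
    []

-- ===== PRECONDITION & SPEC =====
def Spec_sortFreqItem (freqTable : List (List String)) (headerWord : List String) (out : List (List String)) : Prop := out = sortFreqItem_alt freqTable headerWord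
instance (freqTable : List (List String)) (headerWord : List String) (out : List (List String)) : Decidable (Spec_sortFreqItem freqTable headerWord out) := by unfold Spec_sortFreqItem; infer_instance

-- ===== CLAIM (what is proved, stated in full; the proofs are below) =====
def Claim_equal_sortFreqItem : Prop := ∀ (freqTable : List (List String)) (headerWord : List String), Dom_sortFreqItem freqTable headerWord → Spec_sortFreqItem freqTable headerWord (sortFreqItem freqTable headerWord)

-- ===== LEMMAS AND PROOFS =====

theorem posB_getD (hw : List String) (c : String) :
    (posB hw).getD c [] = ((PySem.List.enumerate hw 0).filter (fun p => p.2 == c)).map (fun p => p.1) := by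
  unfold posB
  have h : (PySem.List.enumerate hw 0).foldl (fun d p => d.modify p.2 [] (· ++ [p.1])) PySem.Dict.empty
      = ((PySem.List.enumerate hw 0).map (fun p : Int × String => (p.2, p.1))).foldl
          (fun d q => d.modify q.1 [] (· ++ [q.2])) PySem.Dict.empty := by
    rw [List.foldl_map]
  rw [h]
  rw [PySem.Dict.getD_foldl_modify_append]
  rw [List.filter_map]
  simp [Function.comp_def]

theorem posB_contains (hw : List String) (w : String) :
    (posB hw).contains w = decide (w ∈ hw) := by
  unfold posB
  rw [PySem.Dict.contains_eq_decide_mem_keys,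
    PySem.Dict.keys_foldl_modify_key (PySem.List.enumerate hw 0) (fun p => p.2) [] (fun _ p v => v ++ [p.1])]
  rw [PySem.List.map_snd_enumerate]
  simp [PySem.Set.mem_update, PySem.Dict.empty]

theorem posB_mem (hw : List String) (w : String) (i : Int) :
    i ∈ (posB hw).getD w [] ↔ ∃ (k : Nat) (h : k < hw.length), i = (k : Int) ∧ hw[k] = w := by
  rw [posB_getD]
  simp only [List.mem_map, List.mem_filter, PySem.List.mem_enumerate_iff]
  constructor
  · rintro ⟨p, ⟨⟨k, hk, rfl⟩, hc⟩, rfl⟩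
    exact ⟨k, hk, by simp, by simpa using hc⟩
  · rintro ⟨k, hk, rfl, hkw⟩
    exact ⟨((0 : Int) + (k : Int), hw[k]), ⟨⟨k, hk, rfl⟩, by simpa using hkw⟩, by simp⟩

theorem posB_pairwise (hw : List String) (w : String) :
    ((posB hw).getD w []).Pairwise (· < ·) := by
  rw [posB_getD]
  exact List.pairwise_map.mpr ((PySem.List.pairwise_lt_enumerate hw 0).sublist List.filter_sublist)

-- the gathered, sorted positions are exactly the header positions whose word lies in tid
theorem inner2 (tid : List String) (hw : List String) :
    PySem.List.sorted
        (((PySem.Set.ofList tid).filter (fun w => (posB hw).contains w)).flatMap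
          (fun w => (posB hw).getD w []))
        (fun i => i) false
      = ((PySem.List.enumerate hw 0).filter (fun p => decide (p.2 ∈ tid))).map (fun p => p.1) := by
  apply PySem.List.sorted_eq_of_perm_of_pairwise_lt
  · have hysnd : (((PySem.List.enumerate hw 0).filter (fun p => decide (p.2 ∈ tid))).map (fun p => p.1)).Nodup := by
      refine (List.pairwise_map.mpr ((PySem.List.pairwise_lt_enumerate hw 0).sublist List.filter_sublist)).imp ?_
      exact fun h => ne_of_lt h
    have hfnd : ((((PySem.Set.ofList tid).filter (fun w => (posB hw).contains w)).flatMap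
        (fun w => (posB hw).getD w []))).Nodup := by
      rw [List.nodup_flatMap]
      refine ⟨fun w _ => (posB_pairwise hw w).imp (fun h => ne_of_lt h), ?_⟩
      refine ((PySem.Set.nodup_ofList tid).filter _).imp ?_
      intro a b hab
      simp only [Function.onFun, List.Disjoint]
      intro i hia hib
      obtain ⟨k, hk, hik, hka⟩ := (posB_mem hw a i).mp hia
      obtain ⟨k', hk', hik', hkb⟩ := (posB_mem hw b i).mp hib
      rw [hik] at hik'
      have hkeq : k = k' := by exact_mod_cast hik'
      subst hkeq
      exact hab (hka.symm.trans hkb)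
    rw [List.perm_ext_iff_of_nodup hysnd hfnd]
    intro i
    simp only [List.mem_map, List.mem_filter, List.mem_flatMap, PySem.List.mem_enumerate_iff,
      PySem.Set.mem_ofList, posB_mem, posB_contains]
    constructor
    · rintro ⟨p, ⟨⟨k, hk, rfl⟩, htid⟩, rfl⟩
      refine ⟨hw[k], ⟨by simpa using htid, by simp⟩, ⟨k, hk, by simp, rfl⟩⟩
    · rintro ⟨w, ⟨htid, _⟩, k, hk, rfl, hkw⟩
      exact ⟨((0 : Int) + (k : Int), hw[k]), ⟨⟨k, hk, rfl⟩, by simp [hkw, htid]⟩, by simp⟩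
  · exact List.pairwise_map.mpr ((PySem.List.pairwise_lt_enumerate hw 0).sublist List.filter_sublist)

-- reading the header back at those positions yields A's filtered header list
theorem back (tid : List String) (hw : List String) :
    (((PySem.List.enumerate hw 0).filter (fun p => decide (p.2 ∈ tid))).map (fun p => p.1)).map
        (fun i => PySem.List.pyGetD hw i "")
      = hw.filter (fun w => decide (w ∈ tid)) := by
  rw [List.map_map]
  rw [List.map_congr_left (f := (fun i => PySem.List.pyGetD hw i "") ∘ fun p : Int × String => p.1)
      (g := fun p : Int × String => p.2)
      (h := by
        intro p hp
        obtain ⟨k, hk, rfl⟩ := (PySem.List.mem_enumerate_iff _ _ _).mp (List.mem_filter.mp hp).1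
        simp [PySem.List.pyGetD_natCast, hk])]
  change List.map (fun p : Int × String => p.2)
      ((PySem.List.enumerate hw 0).filter ((fun w => decide (w ∈ tid)) ∘ fun p : Int × String => p.2))
    = hw.filter (fun w => decide (w ∈ tid))
  rw [← List.filter_map]
  rw [PySem.List.map_snd_enumerate]

-- ===== VERDICT (by name: the statement is the Claim_ definition above) =====
theorem sortFreqItem_spec : Claim_equal_sortFreqItem := by
  intro ft hw _
  show sortFreqItem ft hw = sortFreqItem_alt ft hw
  unfold sortFreqItem sortFreqItem_alt
  have hA : ∀ tid : List String,
      hw.foldl (fun t w => if w ∈ tid then t ++ [w] else t) []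
        = hw.filter (fun w => decide (w ∈ tid)) := by
    intro tid
    simpa using PySem.List.foldl_append_if (fun w => decide (w ∈ tid)) id hw []
  have hB : ∀ tid : List String,
      (PySem.List.sorted
          (((PySem.Set.ofList tid).filter (fun w => (posB hw).contains w)).flatMap
            (fun w => (posB hw).getD w []))
          (fun i => i) false).map (fun i => PySem.List.pyGetD hw i "")
        = hw.filter (fun w => decide (w ∈ tid)) := by
    intro tid
    rw [inner2 tid hw]
    exact back tid hw
  simp only [hA, hB]
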